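-- pv_equiv track=rewrite | github.com/idoceb00/pract3-DESENCRIPTAR-SI | vigenere.py | extiende_clave_ciclicamente
-- ===== SOURCE A (Python) =====
-- def extiende_clave_ciclicamente(clave_no_extendida, long_msj):
--     """
--         Crea la clave extendida con base en la longitud del mensaje, cíclicamente.
--
--         Parámetros:
--         clave_no_extendida (str): La clave original que se desea extender.
--         long_msj (int): Longitud del mensaje para el cual se extenderá la clave.
--
--         Returns:
--         str: La clave extendida ciclicamente de tamaño longitud del mensaje.
--     """
--     stop = True
--     extiende_clave = ""
--
--     while stop:
--         resto = long_msj - len(extiende_clave)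
--         if resto == 0:
--             stop = False
--         elif resto < len(extiende_clave):
--             extiende_clave += clave_no_extendida[0:resto]
--         else:
--             extiende_clave += clave_no_extendida
--
--     return extiende_clave
-- ===== SOURCE B (Python) =====
-- def extiende_clave_ciclicamente(clave_no_extendida, long_msj):
--     return "".join(clave_no_extendida[i % len(clave_no_extendida)]
--                    for i in range(long_msj))
-- ===== Notes on version B (the rewrite author's own statement) =====
-- stated objective: idiomatic
-- what changed: B builds the extended key position-by-position with a join over range(long_msj), indexing the key at i % len(key), instead of A's while-loop that appends whole key copies and a remainder slice with chunk/remainder branching.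
import Mathlib
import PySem

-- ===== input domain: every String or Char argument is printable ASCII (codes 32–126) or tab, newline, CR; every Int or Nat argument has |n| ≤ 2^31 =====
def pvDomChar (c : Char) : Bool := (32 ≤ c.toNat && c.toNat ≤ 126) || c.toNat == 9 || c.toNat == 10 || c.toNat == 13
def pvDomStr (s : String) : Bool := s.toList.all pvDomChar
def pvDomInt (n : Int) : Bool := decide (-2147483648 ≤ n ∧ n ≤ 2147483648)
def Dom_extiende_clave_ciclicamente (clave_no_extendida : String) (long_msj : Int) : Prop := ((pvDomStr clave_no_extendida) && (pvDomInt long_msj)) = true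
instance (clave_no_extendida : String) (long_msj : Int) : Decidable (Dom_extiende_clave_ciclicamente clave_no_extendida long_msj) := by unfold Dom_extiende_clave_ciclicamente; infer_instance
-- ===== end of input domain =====

-- B replaces A's while-loop of whole-key appends (with a remainder-slice branch) by an
-- idiomatic join over range(long_msj) indexing the key at i % len(key); return values only.

-- ===== PORT A =====
-- A's while-loop, fueled (the fuel n.toNat + 2 is an upper bound on the iteration count on
-- every input admitted by Pre_; the guard only makes the same computation total).
def pvLoopA (cs : List Char) (n : Int) : Nat → Bool → List Char → List Char
  | 0, _, ext => ext
  | fuel+1, stop, ext =>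
    if stop then
      let resto : Int := n - (ext.length : Int)
      if resto = 0 then pvLoopA cs n fuel false ext
      else if resto < (ext.length : Int) then
        pvLoopA cs n fuel stop (ext ++ PySem.List.slice cs (some 0) (some resto))
      else pvLoopA cs n fuel stop (ext ++ cs)
    else ext

def extiende_clave_ciclicamente (clave_no_extendida : String) (long_msj : Int) : String :=
  String.ofList (pvLoopA clave_no_extendida.toList long_msj (long_msj.toNat + 2) true [])

-- ===== PORT B =====
def extiende_clave_ciclicamente_alt (clave_no_extendida : String) (long_msj : Int) : String :=
  String.ofList ((PySem.List.pyRange 0 long_msj 1).map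
    (fun i => PySem.List.pyGetD clave_no_extendida.toList
      (PySem.Int.mod i (clave_no_extendida.toList.length : Int)) ' '))

-- ===== PRECONDITION & SPEC =====
-- Pre_ holds exactly where Python A terminates: long_msj = 0, or a non-empty key with
-- long_msj ≥ len(key). Elsewhere A loops forever (e.g. 0 < long_msj < len(key), or a
-- negative long_msj, or an empty key with long_msj ≠ 0), so nothing is excluded that A returns on.
def Pre_extiende_clave_ciclicamente (clave_no_extendida : String) (long_msj : Int) : Prop :=
  long_msj = 0 ∨ (clave_no_extendida.toList ≠ [] ∧ (clave_no_extendida.toList.length : Int) ≤ long_msj)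
instance (clave_no_extendida : String) (long_msj : Int) : Decidable (Pre_extiende_clave_ciclicamente clave_no_extendida long_msj) := by unfold Pre_extiende_clave_ciclicamente; infer_instance

def pvWitness_extiende_clave_ciclicamente : String × Int := ("ab", 5)

def Spec_extiende_clave_ciclicamente (clave_no_extendida : String) (long_msj : Int) (out : String) : Prop := out = extiende_clave_ciclicamente_alt clave_no_extendida long_msj
instance (clave_no_extendida : String) (long_msj : Int) (out : String) : Decidable (Spec_extiende_clave_ciclicamente clave_no_extendida long_msj out) := by unfold Spec_extiende_clave_ciclicamente; infer_instance

-- ===== CLAIM (what is proved, stated in full; the proofs are below) =====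
def Claim_equal_extiende_clave_ciclicamente : Prop := ∀ (clave_no_extendida : String) (long_msj : Int), Dom_extiende_clave_ciclicamente clave_no_extendida long_msj → Pre_extiende_clave_ciclicamente clave_no_extendida long_msj → Spec_extiende_clave_ciclicamente clave_no_extendida long_msj (extiende_clave_ciclicamente clave_no_extendida long_msj)

-- ===== LEMMAS AND PROOFS =====

-- the cyclic extension of cs to length N, position by position
def pvCyc (cs : List Char) (N : Nat) : List Char :=
  (List.range N).map (fun i => cs.getD (i % cs.length) ' ')

theorem pvCyc_length (cs : List Char) (N : Nat) : (pvCyc cs N).length = N := by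
  simp [pvCyc]

theorem pvLoopA_false (cs : List Char) (n : Int) (fuel : Nat) (ext : List Char) :
    pvLoopA cs n fuel false ext = ext := by
  cases fuel <;> simp [pvLoopA]

theorem pvLoopA_done (cs : List Char) (n : Int) (fuel : Nat) (ext : List Char)
    (h : n - (ext.length : Int) = 0) : pvLoopA cs n fuel true ext = ext := by
  cases fuel with
  | zero => simp [pvLoopA]
  | succ f => simp [pvLoopA, h, pvLoopA_false]

theorem pvTake_eq_map_range (cs : List Char) (r : Nat) (h : r ≤ cs.length) :
    cs.take r = (List.range r).map (fun i => cs.getD i ' ') := by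
  apply List.ext_getElem
  · simp [h]
  · intro i h1 h2
    simp at h1 h2
    simp [List.getElem_take, List.getD_eq_getElem?_getD, List.getElem?_eq_getElem h1.2]

theorem pvCyc_append (cs : List Char) (m r : Nat) (h : r ≤ cs.length) :
    pvCyc cs (m * cs.length) ++ cs.take r = pvCyc cs (m * cs.length + r) := by
  unfold pvCyc
  rw [List.range_add, List.map_append, pvTake_eq_map_range cs r h, List.map_map]
  congr 1
  apply List.map_congr_left
  intro i hi
  simp at hi
  simp [Function.comp, Nat.mod_eq_of_lt (lt_of_lt_of_le hi h)]

theorem pvLoopA_inv (cs : List Char) (n : Int) :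
    ∀ (fuel m : Nat), 0 < cs.length → (cs.length : Int) ≤ n →
      ((m * cs.length : Nat) : Int) ≤ n → n + 2 ≤ (fuel : Int) + ((m * cs.length : Nat) : Int) →
      pvLoopA cs n fuel true (pvCyc cs (m * cs.length)) = pvCyc cs n.toNat := by
  intro fuel
  induction fuel with
  | zero => intro m hk hkn hm hf; exfalso; omega
  | succ f ih =>
    intro m hk hkn hm hf
    by_cases h0 : n - ((pvCyc cs (m * cs.length)).length : Int) = 0
    · rw [pvLoopA_done cs n _ _ h0]
      rw [pvCyc_length] at h0
      congr 1
      omega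
    · rw [pvCyc_length] at h0
      -- resto = n - m*k ≠ 0, and m*k ≤ n so resto > 0
      have hr : 0 < n - ((m * cs.length : Nat) : Int) := by omega
      by_cases hbig : (cs.length : Int) ≤ n - ((m * cs.length : Nat) : Int)
      · -- both branches append a whole copy of cs
        have hext' : ∀ r : Int, (cs.length : Int) ≤ r →
            PySem.List.slice cs (some 0) (some r) = cs := by
          intro r hrk
          rw [PySem.List.slice_zero_start, PySem.List.slice_to cs (show (0:Int) ≤ r by omega)]
          exact List.take_of_length_le (by omega)
        have hsucc : pvCyc cs (m * cs.length) ++ cs = pvCyc cs ((m+1) * cs.length) := by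
          have := pvCyc_append cs m cs.length (le_refl _)
          simpa [Nat.succ_mul] using this
        have hrec : pvLoopA cs n f true (pvCyc cs ((m+1) * cs.length)) = pvCyc cs n.toNat := by
          apply ih (m+1) hk hkn <;> push_cast [Nat.succ_mul] at * <;> omega
        by_cases hb : (n - ((m * cs.length : Nat) : Int)) < ((m * cs.length : Nat) : Int)
        · simp only [pvLoopA, if_true, pvCyc_length]
          rw [if_neg h0, if_pos hb, hext' _ hbig, hsucc, hrec]
        · simp only [pvLoopA, if_true, pvCyc_length]
          rw [if_neg h0, if_neg hb, hsucc, hrec]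
      · -- final partial append: 0 < resto < k ≤ m*k, lands exactly on length n
        have hm1 : 1 ≤ m := by
          by_contra hm0
          have : m = 0 := by omega
          subst this
          simp at hbig hr
          omega
        have hlt : (n - ((m * cs.length : Nat) : Int)) < ((m * cs.length : Nat) : Int) := by
          have : (cs.length : Int) ≤ ((m * cs.length : Nat) : Int) := by
            push_cast; nlinarith
          omega
        simp only [pvLoopA, if_true, pvCyc_length]
        rw [if_neg h0, if_pos hlt]
        set r : Nat := (n - ((m * cs.length : Nat) : Int)).toNat with hrdef
        have hrk : r ≤ cs.length := by omega
        have hslice : PySem.List.slice cs (some 0) (some (n - ((m * cs.length : Nat) : Int))) = cs.take r := by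
          rw [PySem.List.slice_zero_start, PySem.List.slice_to cs (by omega : (0:Int) ≤ n - ((m * cs.length : Nat) : Int))]
        rw [hslice, pvCyc_append cs m r hrk]
        have hend : m * cs.length + r = n.toNat := by omega
        rw [hend]
        apply pvLoopA_done
        rw [pvCyc_length]
        omega

theorem pvAlt_eq_cyc (clave : String) (n : Int) :
    extiende_clave_ciclicamente_alt clave n = String.ofList (pvCyc clave.toList n.toNat) := by
  unfold extiende_clave_ciclicamente_alt pvCyc
  congr 1
  rw [PySem.List.pyRange_one, List.map_map]
  simp only [sub_zero]
  apply List.map_congr_left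
  intro j hj
  simp only [Function.comp, zero_add]
  rw [PySem.Int.mod_natCast, PySem.List.pyGetD_natCast]

-- ===== VERDICT (by name: the statement is the Claim_ definition above) =====
theorem extiende_clave_ciclicamente_spec : Claim_equal_extiende_clave_ciclicamente := by
  intro clave n _ hpre
  unfold Spec_extiende_clave_ciclicamente
  rcases hpre with h0 | ⟨hne, hkn⟩
  · subst h0
    simp [extiende_clave_ciclicamente, pvLoopA, extiende_clave_ciclicamente_alt]
  · have hk : 0 < clave.toList.length := List.length_pos_of_ne_nil hne
    have hn : 0 ≤ n := le_trans (by exact_mod_cast Nat.cast_nonneg _) hkn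
    rw [pvAlt_eq_cyc clave n]
    unfold extiende_clave_ciclicamente
    congr 1
    have h0 : pvCyc clave.toList (0 * clave.toList.length) = [] := by simp [pvCyc]
    rw [show ([] : List Char) = pvCyc clave.toList (0 * clave.toList.length) from h0.symm]
    apply pvLoopA_inv clave.toList n (n.toNat + 2) 0 hk hkn <;> push_cast <;> omega
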